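-- pv_equiv track=rewrite | github.com/phac-nml/biohansel | biohansel/utils.py | _compare_all_subtypes
-- ===== SOURCE A (Python) =====
-- from typing import List, Any, Tuple, Union
--
-- def _compare_subtypes(subtypes_a: List[Any], subtypes_b: List[Any]) -> bool:
--     """Are 2 subtypes consistent with each other?
--
--     Examples:
--         ```python
--         assert compare_subtypes([1,2,3], [1,2,3]) == True
--         assert compare_subtypes([1,2,3], [1,2]) == True
--         assert compare_subtypes([1], [1,2,3,4,5]) == True
--         assert compare_subtypes([1], [2]) == False
--         assert compare_subtypes([1,2,3,4], [1,2,3,5]) == False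
--         assert compare_subtypes([2,2], [1,2]) == False
--         ```
--
--     Args:
--         subtypes_a: One list of subtype integers to compare
--         subtypes_b:  Other list of subtype integers to compare
--
--     Returns:
--         True if lists are equal up to the last index of the smallest list in the comparison; False otherwise
--     """
--     for subtype_a, subtype_b in zip(subtypes_a, subtypes_b):
--         if subtype_a != subtype_b:
--             return False
--     return True
--
-- def _compare_all_subtypes(subtypes: List[List[int]]) -> List[Tuple[List[int], List[int]]]:
--     """Compare all subtypes against each other and return the pairs of inconsistent subtypes.
--
--     Args:
--         subtypes: Subtypes to compare against each other
--
--     Returns: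
--         Pairs of subtypes that are inconsistent with each other.
--     """
--     inconsistent_subtypes = []
--     for i in range(len(subtypes) - 1):
--         subtypes_a = subtypes[i]
--         for j in range(i + 1, len(subtypes)):
--             subtypes_b = subtypes[j]
--             is_consistent = _compare_subtypes(subtypes_a, subtypes_b)
--             if not is_consistent:
--                 inconsistent_subtypes.append((subtypes_a, subtypes_b))
--     return inconsistent_subtypes
-- ===== SOURCE B (Python) =====
-- from typing import List, Tuple
--
--
-- def _compare_all_subtypes(subtypes: List[List[int]]) -> List[Tuple[List[int], List[int]]]:
--     """Dedup the subtype lists, precompute a consistency table between the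
--     distinct values once, then emit inconsistent pairs by O(1) table lookups."""
--     pos = {}          # tuple(subtype) -> index into uniq
--     uniq = []         # distinct subtype lists, in first-occurrence order
--     cls = []          # cls[i] = index of subtypes[i] in uniq
--     for s in subtypes:
--         key = tuple(s)
--         if key not in pos:
--             pos[key] = len(uniq)
--             uniq.append(s)
--         cls.append(pos[key])
--     # consistency table between distinct values: one prefix comparison per class pair
--     table = [[u[:min(len(u), len(v))] == v[:min(len(u), len(v))] for v in uniq]
--              for u in uniq]
--     inconsistent_subtypes = []
--     n = len(subtypes)
--     for i in range(n - 1):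
--         row = table[cls[i]]
--         si = subtypes[i]
--         for j in range(i + 1, n):
--             if not row[cls[j]]:
--                 inconsistent_subtypes.append((si, subtypes[j]))
--     return inconsistent_subtypes
-- ===== Notes on version B (the rewrite author's own statement) =====
-- stated objective: alternative
-- what changed: B dedups the subtype lists once and precomputes a consistency table between the distinct values (consistency as a min-length prefix comparison), so each of the O(n^2) pairs is decided by a table lookup instead of A's per-pair element-wise scan.
import Mathlib
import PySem

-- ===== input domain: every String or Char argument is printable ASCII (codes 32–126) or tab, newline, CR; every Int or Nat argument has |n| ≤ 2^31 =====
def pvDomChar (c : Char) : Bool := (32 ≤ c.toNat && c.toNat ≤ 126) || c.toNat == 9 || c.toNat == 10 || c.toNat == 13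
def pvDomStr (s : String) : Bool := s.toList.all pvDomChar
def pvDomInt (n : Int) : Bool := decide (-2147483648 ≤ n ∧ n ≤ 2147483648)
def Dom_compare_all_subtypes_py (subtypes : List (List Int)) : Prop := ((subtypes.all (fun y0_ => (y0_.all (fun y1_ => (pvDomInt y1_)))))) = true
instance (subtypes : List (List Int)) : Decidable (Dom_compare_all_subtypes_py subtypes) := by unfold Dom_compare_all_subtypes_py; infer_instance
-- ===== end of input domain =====

-- B replaces A's per-pair element-wise comparison by a dedup pass plus a precomputed
-- consistency table between the distinct subtype lists, so each pair costs one table lookup.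

-- ===== PORT A =====
-- _compare_subtypes: 'for a, b in zip(...): if a != b: return False; return True'
def compareSubtypesLoop : List (Int × Int) → Bool
  | [] => true
  | (x, y) :: rest => if x ≠ y then false else compareSubtypesLoop rest

def compare_subtypes_py (a b : List Int) : Bool :=
  compareSubtypesLoop (a.zip b)

def compare_all_subtypes_py (subtypes : List (List Int)) : List (List Int × List Int) :=
  (PySem.List.pyRange 0 ((subtypes.length : Int) - 1) 1).foldl
    (fun acc i =>
      let a := PySem.List.pyGetD subtypes i []
      (PySem.List.pyRange (i + 1) (subtypes.length : Int) 1).foldl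
        (fun acc2 j =>
          let b := PySem.List.pyGetD subtypes j []
          if !(compare_subtypes_py a b) then acc2 ++ [(a, b)] else acc2)
        acc)
    []

-- ===== PORT B =====
-- consistency by prefix comparison: u[:k] == v[:k] with k = min(len(u), len(v))
def pvConsB (u v : List Int) : Bool :=
  let k := min u.length v.length
  u.take k == v.take k

-- one iteration of Source B's dedup loop; state = (pos, uniq, cls)
def pvBuildStep (st : PySem.Dict (List Int) Int × List (List Int) × List Int)
    (s : List Int) : PySem.Dict (List Int) Int × List (List Int) × List Int :=
  match st.1.get? s with
  | some k => (st.1, st.2.1, st.2.2 ++ [k])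
  | none => (st.1.insert s (st.2.1.length : Int), st.2.1 ++ [s], st.2.2 ++ [(st.2.1.length : Int)])

def compare_all_subtypes_py_alt (subtypes : List (List Int)) : List (List Int × List Int) :=
  let st := subtypes.foldl pvBuildStep (PySem.Dict.empty, [], [])
  let uniq := st.2.1
  let cls := st.2.2
  let table := uniq.map (fun u => uniq.map (fun v => pvConsB u v))
  let n := (subtypes.length : Int)
  (PySem.List.pyRange 0 (n - 1) 1).foldl
    (fun acc i =>
      let row := PySem.List.pyGetD table (PySem.List.pyGetD cls i 0) []
      let si := PySem.List.pyGetD subtypes i []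
      (PySem.List.pyRange (i + 1) n 1).foldl
        (fun acc2 j =>
          if !(PySem.List.pyGetD row (PySem.List.pyGetD cls j 0) true)
          then acc2 ++ [(si, PySem.List.pyGetD subtypes j [])]
          else acc2)
        acc)
    []

-- ===== PRECONDITION & SPEC =====
def Spec_compare_all_subtypes_py (subtypes : List (List Int)) (out : List (List Int × List Int)) : Prop := out = compare_all_subtypes_py_alt subtypes
instance (subtypes : List (List Int)) (out : List (List Int × List Int)) : Decidable (Spec_compare_all_subtypes_py subtypes out) := by unfold Spec_compare_all_subtypes_py; infer_instance

-- ===== CLAIM (what is proved, stated in full; the proofs are below) =====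
def Claim_equal_compare_all_subtypes_py : Prop := ∀ (subtypes : List (List Int)), Dom_compare_all_subtypes_py subtypes → Spec_compare_all_subtypes_py subtypes (compare_all_subtypes_py subtypes)

-- ===== LEMMAS AND PROOFS =====

-- A's zip-walk equals B's prefix comparison
theorem pvConsB_eq (a b : List Int) : pvConsB a b = compareSubtypesLoop (a.zip b) := by
  induction a generalizing b with
  | nil => simp [pvConsB, compareSubtypesLoop]
  | cons x xs ih =>
    cases b with
    | nil => simp [pvConsB, compareSubtypesLoop]
    | cons y ys =>
      by_cases h : x = y
      · subst h
        simpa [pvConsB, compareSubtypesLoop] using ih ys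
      · simp [pvConsB, compareSubtypesLoop, h]

-- invariant of Source B's dedup loop
def pvBuildInv (processed : List (List Int))
    (st : PySem.Dict (List Int) Int × List (List Int) × List Int) : Prop :=
  (∀ s k, st.1.get? s = some k → ∃ kn : Nat, k = (kn : Int) ∧ st.2.1[kn]? = some s) ∧
  st.2.2.length = processed.length ∧
  ∀ m : Nat, m < processed.length →
    ∃ kn : Nat, st.2.2[m]? = some ((kn : Int)) ∧ st.2.1[kn]? = some (processed[m]?.getD [])

theorem pvBuildStep_inv (p : List (List Int))
    (st : PySem.Dict (List Int) Int × List (List Int) × List Int) (s : List Int)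
    (h : pvBuildInv p st) : pvBuildInv (p ++ [s]) (pvBuildStep st s) := by
  obtain ⟨hdict, hlen, hcls⟩ := h
  unfold pvBuildStep
  cases hget : st.1.get? s with
  | some k =>
    obtain ⟨kn, hk, huniq⟩ := hdict s k hget
    refine ⟨hdict, by simp [hlen], ?_⟩
    intro m hm
    simp only [List.length_append, List.length_cons, List.length_nil] at hm
    rcases Nat.lt_or_ge m p.length with hmp | hmp
    · obtain ⟨kn', h1, h2⟩ := hcls m hmp
      refine ⟨kn', ?_, ?_⟩
      · rw [List.getElem?_append_left (show m < st.2.2.length by omega)]; exact h1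
      · rw [List.getElem?_append_left hmp]; exact h2
    · have hmeq : m = p.length := by omega
      subst hmeq
      refine ⟨kn, ?_, ?_⟩
      · rw [← hlen, List.getElem?_concat_length, hk]
      · rw [List.getElem?_concat_length]; simpa using huniq
  | none =>
    have hdict' : ∀ s' k, ((st.1.insert s (st.2.1.length : Int)).get? s' = some k) →
        ∃ kn : Nat, k = (kn : Int) ∧ (st.2.1 ++ [s])[kn]? = some s' := by
      intro s' k hk
      rw [PySem.Dict.get?_insert] at hk
      by_cases hss : s' = s
      · simp [hss] at hk
        exact ⟨st.2.1.length, by omega, by subst hss; rw [List.getElem?_concat_length]⟩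
      · rw [if_neg hss] at hk
        obtain ⟨kn, rfl, h2⟩ := hdict s' k hk
        have hlt : kn < st.2.1.length := (List.getElem?_eq_some_iff.mp h2).1
        exact ⟨kn, rfl, by rw [List.getElem?_append_left hlt]; exact h2⟩
    refine ⟨hdict', by simp [hlen], ?_⟩
    intro m hm
    simp only [List.length_append, List.length_cons, List.length_nil] at hm
    rcases Nat.lt_or_ge m p.length with hmp | hmp
    · obtain ⟨kn', h1, h2⟩ := hcls m hmp
      have hlt : kn' < st.2.1.length := (List.getElem?_eq_some_iff.mp h2).1
      refine ⟨kn', ?_, ?_⟩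
      · rw [List.getElem?_append_left (show m < st.2.2.length by omega)]; exact h1
      · rw [List.getElem?_append_left hlt, List.getElem?_append_left hmp]; exact h2
    · have hmeq : m = p.length := by omega
      subst hmeq
      refine ⟨st.2.1.length, ?_, ?_⟩
      · rw [← hlen, List.getElem?_concat_length]
      · rw [List.getElem?_concat_length, List.getElem?_concat_length]; simp

theorem pvBuild_inv (l : List (List Int)) (p : List (List Int)) (st)
    (h : pvBuildInv p st) : pvBuildInv (p ++ l) (l.foldl pvBuildStep st) := by
  induction l generalizing p st with
  | nil => simpa using h
  | cons x xs ih =>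
    have := ih (p ++ [x]) (pvBuildStep st x) (pvBuildStep_inv p st x h)
    simpa [List.append_assoc] using this

theorem pv_main (subtypes : List (List Int)) :
    compare_all_subtypes_py_alt subtypes = compare_all_subtypes_py subtypes := by
  have hinit : pvBuildInv []
      ((PySem.Dict.empty : PySem.Dict (List Int) Int), ([] : List (List Int)), ([] : List Int)) := by
    refine ⟨?_, rfl, ?_⟩
    · intro s k hk; simp [PySem.Dict.get?_empty] at hk
    · intro m hm; simp at hm
  have hinv := pvBuild_inv subtypes [] _ hinit
  simp only [List.nil_append] at hinv
  obtain ⟨hdict, hlen, hcls⟩ := hinv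
  unfold compare_all_subtypes_py_alt compare_all_subtypes_py
  apply PySem.List.foldl_congr_mem
  intro acc i hi
  rw [PySem.List.mem_pyRange_one] at hi
  obtain ⟨jN0, rfl⟩ := Int.eq_ofNat_of_zero_le hi.1
  apply PySem.List.foldl_congr_mem
  intro acc2 j hj
  rw [PySem.List.mem_pyRange_one] at hj
  obtain ⟨jN, rfl⟩ := Int.eq_ofNat_of_zero_le (show (0:Int) ≤ j by omega)
  have hiN : jN0 < subtypes.length := by omega
  have hjN : jN < subtypes.length := by omega
  obtain ⟨ki, hci, hui⟩ := hcls jN0 hiN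
  obtain ⟨kj, hcj, huj⟩ := hcls jN hjN
  have hcond :
      PySem.List.pyGetD
        (PySem.List.pyGetD
          ((subtypes.foldl pvBuildStep (PySem.Dict.empty, [], [])).2.1.map
            (fun u => (subtypes.foldl pvBuildStep (PySem.Dict.empty, [], [])).2.1.map
              (fun v => pvConsB u v)))
          (PySem.List.pyGetD (subtypes.foldl pvBuildStep (PySem.Dict.empty, [], [])).2.2 (jN0 : Int) 0) [])
        (PySem.List.pyGetD (subtypes.foldl pvBuildStep (PySem.Dict.empty, [], [])).2.2 (jN : Int) 0) true
      = compare_subtypes_py (PySem.List.pyGetD subtypes (jN0 : Int) [])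
          (PySem.List.pyGetD subtypes (jN : Int) []) := by
    rw [PySem.List.pyGetD_natCast, PySem.List.pyGetD_natCast,
        List.getD_eq_getElem?_getD, List.getD_eq_getElem?_getD, hci, hcj]
    simp only [Option.getD_some, PySem.List.pyGetD_natCast, List.getD_eq_getElem?_getD,
      List.getElem?_map, hui, huj, Option.map_some, Option.getD_some]
    rw [compare_subtypes_py, ← pvConsB_eq]
  rw [hcond]

-- ===== VERDICT (by name: the statement is the Claim_ definition above) =====
theorem compare_all_subtypes_py_spec : Claim_equal_compare_all_subtypes_py := by
  intro subtypes _
  unfold Spec_compare_all_subtypes_py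
  exact (pv_main subtypes).symm
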